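-- pv_equiv track=rewrite | github.com/AlexMorson/gsa-ultra-2018 | squared/code.py | solution
-- ===== SOURCE A (Python) =====
-- def solution(a):
--     squares = {str(x*x) for x in range(32)}
--     def almost_square(n):
--         n = str(n)
--         for i in range(len(n)):
--             if n[:i] + n[i+1:] in squares:
--                 return True
--         return False
--
--     c = 0
--     for n in range(10, a+1):
--         if almost_square(n):
--             c += 1
--     return c
-- ===== SOURCE B (Python) =====
-- def solution(a):
--     # A number n >= 10 loses a digit to a square string exactly when n is obtained
--     # by inserting one digit into the decimal form of some q = x*x (x < 32) without
--     # creating a leading zero.  Build that fixed candidate set arithmetically once,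
--     # then count the distinct candidates <= a.
--     cands = set()
--     for x in range(32):
--         q = x * x
--         L = 1 if q < 10 else (2 if q < 100 else 3)  # digit length of q (q <= 961)
--         for i in range(L + 1):          # insertion position, counted from the right
--             hi = q // 10 ** i
--             lo = q % 10 ** i
--             for d in range(10):
--                 t = (hi * 10 + d) * 10 ** i + lo
--                 if t >= 10 ** L:        # no leading zero: t keeps L+1 digits
--                     cands.add(t)
--     return sum(1 for m in cands if m <= a)
-- ===== Notes on version B (the rewrite author's own statement) =====
-- stated objective: faster
-- what changed: A scans every n from 10 to a and string-slices each one against the 32 square strings; B builds once, by pure arithmetic, the fixed set of numbers obtainable by inserting one digit into a square of x<32 without creating a leading zero, and just counts the distinct candidates <= a.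
import Mathlib
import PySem

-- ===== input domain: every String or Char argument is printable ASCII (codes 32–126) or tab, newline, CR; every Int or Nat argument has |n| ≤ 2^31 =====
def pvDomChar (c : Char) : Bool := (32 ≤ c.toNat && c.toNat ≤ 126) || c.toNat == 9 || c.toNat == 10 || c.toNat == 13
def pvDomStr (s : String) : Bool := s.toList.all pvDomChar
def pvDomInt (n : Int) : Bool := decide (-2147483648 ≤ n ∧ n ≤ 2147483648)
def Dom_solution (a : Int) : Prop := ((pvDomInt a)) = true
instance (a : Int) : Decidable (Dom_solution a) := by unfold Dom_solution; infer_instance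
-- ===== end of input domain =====

-- B replaces A's scan of every n ≤ a (string-slicing each one) by a fixed candidate set
-- built once arithmetically from the 32 squares; counting candidates ≤ a is constant work.


-- ===== PORT A =====
-- squares = {str(x*x) for x in range(32)}   (strings modelled at the List Char level)
def pySquares : PySem.Set (List Char) :=
  PySem.Set.ofList ((PySem.List.pyRange 0 32 1).map (fun x => PySem.Int.toChars (x * x)))

-- def almost_square(n): n = str(n); for i in range(len(n)): if n[:i]+n[i+1:] in squares: return True; return False
def almostSquare (n : Int) : Bool :=
  let s := PySem.Int.toChars n
  (PySem.List.pyRange 0 (s.length : Int) 1).any (fun i =>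
    PySem.Set.contains pySquares
      (PySem.List.slice s none (some i) ++ PySem.List.slice s (some (i + 1)) none))

def solution (a : Int) : Int :=
  (PySem.List.pyRange 10 (a + 1) 1).foldl (fun c n => if almostSquare n then c + 1 else c) 0

-- ===== PORT B =====
-- cands = set(); for x in range(32): q = x*x; L = 1 if q < 10 else (2 if q < 100 else 3)
--   for i in range(L+1): hi = q // 10**i; lo = q % 10**i
--     for d in range(10): t = (hi*10+d)*10**i + lo; if t >= 10**L: cands.add(t)
-- (10**i is ported as (10:Int)^i.toNat — exact here since range gives i ≥ 0)
def altCands : PySem.Set Int :=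
  (PySem.List.pyRange 0 32 1).foldl
    (fun cs x =>
      let q := x * x
      let L : Int := if q < 10 then 1 else if q < 100 then 2 else 3
      (PySem.List.pyRange 0 (L + 1) 1).foldl
        (fun cs i =>
          let hi := PySem.Int.floordiv q ((10 : Int) ^ i.toNat)
          let lo := PySem.Int.mod q ((10 : Int) ^ i.toNat)
          (PySem.List.pyRange 0 10 1).foldl
            (fun cs d =>
              let t := (hi * 10 + d) * (10 : Int) ^ i.toNat + lo
              if (10 : Int) ^ L.toNat ≤ t then PySem.Set.add cs t else cs)
            cs)
        cs)
    PySem.Set.empty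

-- return sum(1 for m in cands if m <= a)
def solution_alt (a : Int) : Int :=
  ((altCands.filter (fun m => decide (m ≤ a))).map (fun _ => (1 : Int))).sum

-- ===== PRECONDITION & SPEC =====
def Spec_solution (a : Int) (out : Int) : Prop := out = solution_alt a
instance (a : Int) (out : Int) : Decidable (Spec_solution a out) := by unfold Spec_solution; infer_instance

-- ===== CLAIM (what is proved, stated in full; the proofs are below) =====
def Claim_equal_solution : Prop := ∀ (a : Int), Dom_solution a → Spec_solution a (solution a)

-- ===== LEMMAS AND PROOFS =====

-- a decimal-string toolbox for Nat.toDigits 10 -----------------------------------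

def pvDig (c : Char) : Prop := 48 ≤ c.toNat ∧ c.toNat ≤ 57

def pvVal (cs : List Char) : Nat := cs.foldl (fun v c => 10 * v + (c.toNat - 48)) 0

def pvTd (m : Nat) : List Char := Nat.toDigits 10 m

def pvLen3 (q : Nat) : Nat := if q < 10 then 1 else if q < 100 then 2 else 3

-- m arises by inserting digit d at position i (from the right) into some square q = x*x
def pvIns (m : Nat) : Prop := ∃ x < 32, ∃ i ≤ pvLen3 (x * x), ∃ d < 10,
    m = ((x * x) / 10 ^ i * 10 + d) * 10 ^ i + (x * x) % 10 ^ i ∧ 10 ^ pvLen3 (x * x) ≤ m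

-- deleting the j-th digit of str(m) gives one of the 32 square strings
def pvDel (m : Nat) : Prop := ∃ j < (pvTd m).length,
    ((pvTd m).take j ++ (pvTd m).drop (j + 1)) ∈ (List.range 32).map (fun x => pvTd (x * x))

-- arithmetic form of pvDel (i = position from the right)
def pvNum (m : Nat) : Prop := ∃ i < (pvTd m).length, ∃ x < 32,
    m / 10 ^ (i + 1) * 10 ^ i + m % 10 ^ i = x * x ∧
    (i + 1 = (pvTd m).length →
      (pvTd m).length = 2 ∨ 10 ^ ((pvTd m).length - 2) ≤ x * x)

theorem tdc_append : ∀ (f n : Nat) (ds : List Char),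
    Nat.toDigitsCore 10 f n ds = Nat.toDigitsCore 10 f n [] ++ ds := by
  intro f
  induction f with
  | zero => intro n ds; simp [Nat.toDigitsCore]
  | succ f ih =>
    intro n ds
    simp only [Nat.toDigitsCore]
    by_cases h : n / 10 = 0
    · simp [h]
    · simp only [h, if_false]
      rw [ih (n / 10) [Nat.digitChar (n % 10)], ih (n / 10) (Nat.digitChar (n % 10) :: ds)]
      simp

theorem tdc_fuel_one : ∀ (f n : Nat) (ds : List Char), n < 10 ^ f → 0 < f →
    Nat.toDigitsCore 10 (f + 1) n ds = Nat.toDigitsCore 10 f n ds := by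
  intro f
  induction f with
  | zero => intro n ds _ h0; omega
  | succ f ih =>
    intro n ds hn _
    simp only [Nat.toDigitsCore]
    by_cases h : n / 10 = 0
    · simp [h]
    · simp only [h, if_false]
      rcases Nat.eq_zero_or_pos f with hf | hf
      · subst hf; simp [pow_one] at hn; omega
      · exact ih (n / 10) _ (by
          have : n < 10 ^ f * 10 := by rw [← pow_succ]; exact hn
          omega) hf

theorem tdc_fuel : ∀ (f g n : Nat) (ds : List Char), n < 10 ^ f → 0 < f →
    Nat.toDigitsCore 10 (f + g) n ds = Nat.toDigitsCore 10 f n ds := by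
  intro f g
  induction g with
  | zero => intro n ds _ _; rfl
  | succ g ih =>
    intro n ds hn hf
    have h1 : f + (g + 1) = (f + g) + 1 := by omega
    rw [h1, tdc_fuel_one (f + g) n ds (lt_of_lt_of_le hn (Nat.pow_le_pow_right (by norm_num) (by omega))) (by omega)]
    exact ih n ds hn hf

theorem td_lt10 (m : Nat) (h : m < 10) : pvTd m = [Nat.digitChar m] := by
  simp [pvTd, Nat.toDigits, Nat.toDigitsCore, Nat.div_eq_of_lt h, Nat.mod_eq_of_lt h]

theorem td_rec (m : Nat) (h : 10 ≤ m) : pvTd m = pvTd (m / 10) ++ [Nat.digitChar (m % 10)] := by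
  have hne : ¬ (m / 10 = 0) := by omega
  have h1 : pvTd m = Nat.toDigitsCore 10 m (m / 10) (Nat.digitChar (m % 10) :: []) := by
    simp [pvTd, Nat.toDigits, Nat.toDigitsCore, hne]
  rw [h1, tdc_append]
  congr 1
  obtain ⟨n', hn'⟩ : ∃ n', m / 10 = n' := ⟨_, rfl⟩
  have hlt : n' < m := by omega
  rw [hn']
  have h2 : m = (n' + 1) + (m - n' - 1) := by omega
  rw [h2, tdc_fuel (n' + 1) (m - n' - 1) n' []
      (lt_of_lt_of_le (Nat.lt_pow_self (by norm_num)) (Nat.pow_le_pow_right (by norm_num) (by omega)))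
      (by omega)]
  rfl

theorem digitChar_toNat (m : Nat) (h : m < 10) : (Nat.digitChar m).toNat = 48 + m := by
  interval_cases m <;> rfl

theorem digitChar_dig (m : Nat) (h : m < 10) : pvDig (Nat.digitChar m) := by
  interval_cases m <;> exact ⟨by decide, by decide⟩

theorem char_eq_of_toNat_eq (c d : Char) (h : c.toNat = d.toNat) : c = d := by
  apply Char.ext
  exact UInt32.toNat_inj.mp h

theorem digitChar_of_dig (c : Char) (h : pvDig c) : Nat.digitChar (c.toNat - 48) = c := by
  unfold pvDig at h
  apply char_eq_of_toNat_eq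
  rw [digitChar_toNat (c.toNat - 48) (by omega)]
  omega

theorem td_ne_nil (m : Nat) : pvTd m ≠ [] := by
  rcases lt_or_ge m 10 with h | h
  · rw [td_lt10 m h]; simp
  · rw [td_rec m h]; simp

theorem td_digits (m : Nat) : ∀ c ∈ pvTd m, pvDig c := by
  induction m using Nat.strong_induction_on with
  | _ m ih =>
    rcases lt_or_ge m 10 with h | h
    · rw [td_lt10 m h]; intro c hc; simp at hc; subst hc; exact digitChar_dig m h
    · rw [td_rec m h]; intro c hc
      rcases List.mem_append.mp hc with hc | hc
      · exact ih (m / 10) (by omega) c hc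
      · simp at hc; subst hc; exact digitChar_dig _ (Nat.mod_lt _ (by omega))

theorem pvVal_aux : ∀ (cs : List Char) (v : Nat),
    cs.foldl (fun v c => 10 * v + (c.toNat - 48)) v = v * 10 ^ cs.length + pvVal cs := by
  intro cs
  induction cs with
  | nil => intro v; simp [pvVal]
  | cons c t ih =>
    intro v
    have h0 : pvVal (c :: t) = t.foldl (fun v c => 10 * v + (c.toNat - 48)) (10 * 0 + (c.toNat - 48)) := rfl
    simp only [List.foldl, List.length_cons]
    rw [ih (10 * v + (c.toNat - 48)), h0, ih (10 * 0 + (c.toNat - 48))]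
    ring

theorem pvVal_cons (c : Char) (t : List Char) :
    pvVal (c :: t) = (c.toNat - 48) * 10 ^ t.length + pvVal t := by
  have h0 : pvVal (c :: t) = t.foldl (fun v c => 10 * v + (c.toNat - 48)) (10 * 0 + (c.toNat - 48)) := rfl
  rw [h0, pvVal_aux]
  ring

theorem pvVal_append (a b : List Char) :
    pvVal (a ++ b) = pvVal a * 10 ^ b.length + pvVal b := by
  unfold pvVal
  rw [List.foldl_append]
  exact pvVal_aux b _

theorem td_val (m : Nat) : pvVal (pvTd m) = m := by
  induction m using Nat.strong_induction_on with
  | _ m ih =>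
    rcases lt_or_ge m 10 with h | h
    · rw [td_lt10 m h, pvVal_cons]
      simp [pvVal, digitChar_toNat m h]
    · rw [td_rec m h, pvVal_append, ih (m / 10) (by omega)]
      have h2 : pvVal [Nat.digitChar (m % 10)] = m % 10 := by
        rw [pvVal_cons]; simp [pvVal, digitChar_toNat (m % 10) (by omega)]
      rw [h2]
      simp
      omega

theorem td_head (m : Nat) (h : 1 ≤ m) : (pvTd m).head? ≠ some '0' := by
  induction m using Nat.strong_induction_on with
  | _ m ih =>
    rcases lt_or_ge m 10 with hm | hm
    · rw [td_lt10 m hm]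
      simp
      intro heq
      have h2 := congrArg Char.toNat heq
      rw [digitChar_toNat m hm] at h2
      have h3 : ('0' : Char).toNat = 48 := rfl
      omega
    · rw [td_rec m hm]
      obtain ⟨c, t, heq⟩ := List.exists_cons_of_ne_nil (td_ne_nil (m / 10))
      have := ih (m / 10) (by omega) (by omega)
      rw [heq] at this ⊢
      simpa using this

theorem td_len (m : Nat) (h : 1 ≤ m) :
    10 ^ ((pvTd m).length - 1) ≤ m ∧ m < 10 ^ (pvTd m).length := by
  induction m using Nat.strong_induction_on with
  | _ m ih =>
    rcases lt_or_ge m 10 with hm | hm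
    · rw [td_lt10 m hm]; simpa using ⟨h, hm⟩
    · rw [td_rec m hm]
      have hpos : 1 ≤ (pvTd (m / 10)).length := List.length_pos_iff.mpr (td_ne_nil (m / 10))
      obtain ⟨ih1, ih2⟩ := ih (m / 10) (by omega) (by omega)
      simp only [List.length_append, List.length_cons, List.length_nil]
      set L := (pvTd (m / 10)).length with hL
      have e1 : 10 ^ (L - 1 + 1) = 10 ^ (L - 1) * 10 := pow_succ 10 (L - 1)
      have e2 : 10 ^ (L + 1) = 10 ^ L * 10 := pow_succ 10 L
      have e3 : L - 1 + 1 = L := by omega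
      rw [e3] at e1
      constructor
      · have : L + 0 + 1 - 1 = L := by omega
        rw [this, e1]
        omega
      · have : L + 0 + 1 = L + 1 := by omega
        rw [this, e2]
        omega

theorem td_zero : pvTd 0 = ['0'] := by
  rw [td_lt10 0 (by norm_num)]
  rfl

theorem pvVal_lt (cs : List Char) (h : ∀ c ∈ cs, pvDig c) : pvVal cs < 10 ^ cs.length := by
  induction cs with
  | nil => simp [pvVal]
  | cons c t ih =>
    rw [pvVal_cons]
    have h1 : c.toNat - 48 ≤ 9 := by have := h c (by simp); unfold pvDig at this; omega
    have h2 : pvVal t < 10 ^ t.length := ih (fun x hx => h x (by simp [hx]))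
    simp only [List.length_cons, pow_succ]
    nlinarith

theorem char_toNat_zero : ('0' : Char).toNat = 48 := rfl

theorem head_ne_zero_iff (c : Char) (t : List Char) (h : ∀ x ∈ c :: t, pvDig x) :
    c ≠ '0' ↔ 10 ^ t.length ≤ pvVal (c :: t) := by
  have hc := h c (by simp)
  unfold pvDig at hc
  rw [pvVal_cons]
  constructor
  · intro hne
    have h48 : c.toNat ≠ 48 := by
      intro he
      exact hne (char_eq_of_toNat_eq c '0' (by rw [he, char_toNat_zero]))
    have : 1 ≤ c.toNat - 48 := by omega
    have hp : 10 ^ t.length ≤ (c.toNat - 48) * 10 ^ t.length := Nat.le_mul_of_pos_left _ (by omega)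
    omega
  · intro hge he
    subst he
    rw [char_toNat_zero] at hge
    simp at hge
    have := pvVal_lt t (fun x hx => h x (by simp [hx]))
    omega

theorem td_canon (cs : List Char) (h0 : cs ≠ []) (h1 : ∀ c ∈ cs, pvDig c)
    (h2 : cs.head? ≠ some '0' ∨ cs = ['0']) : pvTd (pvVal cs) = cs := by
  induction cs using List.reverseRecOn with
  | nil => exact absurd rfl h0
  | append_singleton ds c ih =>
    have hcd : pvDig c := h1 c (by simp)
    have hcd' := hcd
    unfold pvDig at hcd'
    cases ds with
    | nil =>
      simp only [List.nil_append]
      have hk : pvVal [c] = c.toNat - 48 := by rw [pvVal_cons]; simp [pvVal]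
      rw [hk, td_lt10 _ (by omega), digitChar_of_dig c hcd]
    | cons e ds' =>
      have hdsd : ∀ x ∈ e :: ds', pvDig x := fun x hx => h1 x (List.mem_append_left _ hx)
      have hhead : e ≠ '0' := by
        rcases h2 with h2 | h2
        · simpa using h2
        · exfalso
          have h3 := congrArg List.length h2
          simp only [List.length_append, List.length_cons, List.length_nil] at h3
          omega
      have hlb : 10 ^ ds'.length ≤ pvVal (e :: ds') := (head_ne_zero_iff e ds' hdsd).mp hhead
      have hpos : 1 ≤ pvVal (e :: ds') := le_trans (Nat.one_le_pow _ _ (by norm_num)) hlb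
      have hkc : pvVal [c] = c.toNat - 48 := by rw [pvVal_cons]; simp [pvVal]
      have hval : pvVal ((e :: ds') ++ [c]) = pvVal (e :: ds') * 10 + (c.toNat - 48) := by
        rw [pvVal_append, hkc]
        simp
      have hge : 10 ≤ pvVal (e :: ds') * 10 + (c.toNat - 48) := by omega
      rw [hval, td_rec _ hge]
      have hdiv : (pvVal (e :: ds') * 10 + (c.toNat - 48)) / 10 = pvVal (e :: ds') := by omega
      have hmod : (pvVal (e :: ds') * 10 + (c.toNat - 48)) % 10 = c.toNat - 48 := by omega
      rw [hdiv, hmod, digitChar_of_dig c hcd]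
      congr 1
      exact ih (by simp) hdsd (Or.inl (by simpa using hhead))

theorem val_take_drop (s : List Char) (k : Nat) (hk : k ≤ s.length)
    (hd : ∀ c ∈ s, pvDig c) :
    pvVal (s.take k) = pvVal s / 10 ^ (s.length - k) ∧
    pvVal (s.drop k) = pvVal s % 10 ^ (s.length - k) := by
  have hsplit : s = s.take k ++ s.drop k := (List.take_append_drop k s).symm
  have hlen : (s.drop k).length = s.length - k := by simp
  have hval : pvVal s = pvVal (s.take k) * 10 ^ (s.length - k) + pvVal (s.drop k) := by
    conv_lhs => rw [hsplit]
    rw [pvVal_append, hlen]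
  have hlt : pvVal (s.drop k) < 10 ^ (s.length - k) := by
    rw [← hlen]
    exact pvVal_lt _ (fun c hc => hd c (List.mem_of_mem_drop hc))
  have hpos : 0 < 10 ^ (s.length - k) := pow_pos (by norm_num) _
  constructor
  · rw [hval, Nat.mul_comm, Nat.mul_add_div hpos, Nat.div_eq_of_lt hlt]
    omega
  · rw [hval, Nat.mul_comm, Nat.mul_add_mod, Nat.mod_eq_of_lt hlt]

theorem pow10_lt_iff (a b : Nat) : 10 ^ a < 10 ^ b ↔ a < b :=
  Nat.pow_lt_pow_iff_right (by norm_num)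

-- step S1: the A port, characterized ---------------------------------------------

theorem toChars_nonneg (n : Int) (h : 0 ≤ n) : PySem.Int.toChars n = pvTd n.toNat := by
  unfold PySem.Int.toChars pvTd
  rw [if_neg (by omega)]

theorem sqStrs_eq : (PySem.List.pyRange 0 32 1).map (fun x => PySem.Int.toChars (x * x))
    = (List.range 32).map (fun x => pvTd (x * x)) := by
  have h32 : (32 : Int) = ((32 : Nat) : Int) := by norm_num
  rw [h32, PySem.List.pyRange_zero_nat, List.map_map]
  apply List.map_congr_left
  intro k _
  simp only [Function.comp_apply]
  rw [toChars_nonneg _ (by positivity)]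
  congr 1

theorem contains_sq (q : List Char) :
    (PySem.Set.contains pySquares q = true) ↔ q ∈ (List.range 32).map (fun x => pvTd (x * x)) := by
  rw [PySem.Set.contains_iff]
  unfold pySquares
  rw [PySem.Set.mem_ofList, sqStrs_eq]

theorem S1 (n : Int) (hn : 10 ≤ n) : almostSquare n = true ↔ pvDel n.toNat := by
  unfold almostSquare pvDel
  rw [toChars_nonneg n (by omega)]
  rw [List.any_eq_true]
  constructor
  · rintro ⟨i, hi, hc⟩
    rw [PySem.List.mem_pyRange_one] at hi
    obtain ⟨hi0, hiL⟩ := hi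
    have hj : i.toNat < (pvTd n.toNat).length := by omega
    refine ⟨i.toNat, hj, ?_⟩
    rw [PySem.List.slice_to _ hi0, PySem.List.slice_from _ (by omega)] at hc
    have he : (i + 1).toNat = i.toNat + 1 := by omega
    rw [he] at hc
    exact (contains_sq _).mp hc
  · rintro ⟨j, hj, hmem⟩
    refine ⟨(j : Int), ?_, ?_⟩
    · rw [PySem.List.mem_pyRange_one]
      constructor
      · positivity
      · exact_mod_cast hj
    · rw [PySem.List.slice_to _ (by positivity), PySem.List.slice_from _ (by positivity)]
      have he : ((j : Int) + 1).toNat = j + 1 := by omega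
      have he2 : ((j : Int)).toNat = j := by omega
      rw [he, he2]
      exact (contains_sq _).mpr hmem

-- step S3: strings to arithmetic -------------------------------------------------

theorem pvLen3_pos (q : Nat) : 1 ≤ pvLen3 q := by unfold pvLen3; split_ifs <;> omega

theorem pvLen3_le3 (q : Nat) : pvLen3 q ≤ 3 := by unfold pvLen3; split_ifs <;> omega

theorem pvLen3_ub (q : Nat) (h : q < 1000) : q < 10 ^ pvLen3 q := by
  unfold pvLen3; split_ifs <;> norm_num <;> omega

theorem pvLen3_lb (q : Nat) (h : 2 ≤ pvLen3 q) : 10 ^ (pvLen3 q - 1) ≤ q := by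
  unfold pvLen3 at *; split_ifs at * <;> norm_num <;> omega

theorem pvLen3_eq_of (q a : Nat) (hq : q < 1000) (ha : 1 ≤ a)
    (h1 : 10 ^ (a - 1) ≤ q) (h2 : q < 10 ^ a) : pvLen3 q = a := by
  have ha3 : a ≤ 3 := by
    by_contra hc
    have hp : 10 ^ 3 ≤ 10 ^ (a - 1) := Nat.pow_le_pow_right (by norm_num) (by omega)
    norm_num at hp
    omega
  interval_cases a <;> unfold pvLen3 <;> split_ifs <;> norm_num at * <;> omega

theorem sq_lt (x : Nat) (h : x < 32) : x * x < 1000 := by nlinarith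

theorem S3 (m : Nat) (hm : 10 ≤ m) : pvDel m ↔ pvNum m := by
  have hd := td_digits m
  have hvalm := td_val m
  have hL := td_len m (by omega)
  have hLpos : 1 ≤ (pvTd m).length := List.length_pos_iff.mpr (td_ne_nil m)
  have hL2 : 2 ≤ (pvTd m).length := by
    by_contra hc
    have h1 : (pvTd m).length = 1 := by omega
    rw [h1] at hL
    simp at hL
    omega
  unfold pvDel pvNum
  set s := pvTd m with hs
  set L := s.length with hLdef
  obtain ⟨hLlo, hLhi⟩ := hL
  have hdel : ∀ j, j < L →
      pvVal (s.take j ++ s.drop (j + 1)) =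
        m / 10 ^ (L - 1 - j + 1) * 10 ^ (L - 1 - j) + m % 10 ^ (L - 1 - j) := by
    intro j hj
    have h1 := (val_take_drop s j (by omega) hd).1
    have h2 := (val_take_drop s (j + 1) (by omega) hd).2
    have hlen : (s.drop (j + 1)).length = L - (j + 1) := by
      rw [List.length_drop]
    have e1 : L - (j + 1) = L - 1 - j := by omega
    have e2 : L - j = L - 1 - j + 1 := by omega
    rw [pvVal_append, hlen, e1, h1, h2, hvalm, e1, e2]
  have hdellen : ∀ j, j < L → (s.take j ++ s.drop (j + 1)).length = L - 1 := by
    intro j hj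
    rw [List.length_append, List.length_take, List.length_drop]
    omega
  constructor
  · rintro ⟨j, hj, hmem⟩
    simp only [List.mem_map, List.mem_range] at hmem
    obtain ⟨x, hx32, hq⟩ := hmem
    refine ⟨L - 1 - j, by omega, x, hx32, ?_, ?_⟩
    · have hv : pvVal (s.take j ++ s.drop (j + 1)) = x * x := by
        rw [← hq, td_val]
      rw [hdel j hj] at hv
      exact hv
    · intro hiL
      have hj0 : j = 0 := by omega
      subst hj0
      by_cases hLtwo : L = 2
      · exact Or.inl hLtwo
      · right
        have hlenq : (pvTd (x * x)).length = L - 1 := by rw [hq]; exact hdellen 0 (by omega)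
        have hxx1 : 1 ≤ x * x := by
          by_contra hc
          have hx0 : x * x = 0 := by omega
          rw [hx0, td_zero] at hlenq
          simp at hlenq
          omega
        have hb := (td_len (x * x) hxx1).1
        rw [hlenq] at hb
        have e : L - 1 - 1 = L - 2 := by omega
        rw [e] at hb
        exact hb
  · rintro ⟨i, hiL, x, hx32, hvq, hcond⟩
    obtain ⟨j, hjdef⟩ : ∃ j, j = L - 1 - i := ⟨_, rfl⟩
    have hjL : j < L := by omega
    refine ⟨j, hjL, ?_⟩
    simp only [List.mem_map, List.mem_range]
    refine ⟨x, hx32, ?_⟩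
    have hdq : ∀ c ∈ s.take j ++ s.drop (j + 1), pvDig c := by
      intro c hc
      rcases List.mem_append.mp hc with hc | hc
      · exact hd c (List.mem_of_mem_take hc)
      · exact hd c (List.mem_of_mem_drop hc)
    have hvv : pvVal (s.take j ++ s.drop (j + 1)) = x * x := by
      rw [hdel j hjL]
      have e1 : L - 1 - j = i := by omega
      rw [e1]
      exact hvq
    have hne : s.take j ++ s.drop (j + 1) ≠ [] := by
      intro hnil
      have hdl := hdellen j hjL
      rw [hnil] at hdl
      simp at hdl
      omega
    have hcanon : (s.take j ++ s.drop (j + 1)).head? ≠ some '0' ∨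
        s.take j ++ s.drop (j + 1) = ['0'] := by
      by_cases hj0 : j = 0
      · subst hj0
        have hi' : i + 1 = L := by omega
        simp only [List.take_zero, List.nil_append, Nat.zero_add]
        have hvv' : pvVal (s.drop 1) = x * x := by
          have := hvv
          simpa using this
        rcases hcond hi' with h2 | h2
        · have hlen1 : (s.drop 1).length = 1 := by rw [List.length_drop]; omega
          obtain ⟨c', t', hct⟩ := List.exists_cons_of_ne_nil
            (by intro hnil; rw [hnil] at hlen1; simp at hlen1 : s.drop 1 ≠ [])
          have ht' : t' = [] := by
            cases t' with
            | nil => rfl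
            | cons a b =>
              exfalso
              have hh := congrArg List.length hct
              rw [hlen1] at hh
              simp at hh
          by_cases hc0 : c' = '0'
          · right
            rw [hct, ht', hc0]
          · left
            rw [hct]
            simpa using hc0
        · left
          obtain ⟨c', t', hct⟩ := List.exists_cons_of_ne_nil
            (by intro hnil; rw [hnil] at hvv'; simp [pvVal] at hvv'; nlinarith [h2, pow_pos (by norm_num : (0:Nat) < 10) (L-2)] : s.drop 1 ≠ [])
          have hlt' : t'.length = L - 2 := by
            have hh := congrArg List.length hct
            rw [List.length_drop] at hh
            simp at hh
            omega
          have hdq' : ∀ c ∈ c' :: t', pvDig c := by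
            rw [← hct]
            intro c hc
            exact hd c (List.mem_of_mem_drop hc)
          have hval' : 10 ^ t'.length ≤ pvVal (c' :: t') := by
            rw [hlt', ← hct, hvv']
            exact h2
          have hcz := (head_ne_zero_iff c' t' hdq').mpr hval'
          rw [hct]
          simpa using hcz
      · left
        obtain ⟨c, t, hct⟩ := List.exists_cons_of_ne_nil (td_ne_nil m)
        have hhead := td_head m (by omega)
        rw [← hs] at hct
        obtain ⟨j', rfl⟩ : ∃ j', j = j' + 1 := ⟨j - 1, by omega⟩
        rw [hct]
        simp only [List.take_succ_cons, List.cons_append, List.head?_cons]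
        rw [← hs, hct] at hhead
        simpa using hhead
    rw [← hvv]
    exact td_canon _ hne hdq hcanon


-- step S4: delete/insert bijection -----------------------------------------------

theorem ins_m_ub (x i d m : Nat) (hx32 : x < 32) (hd10 : d < 10)
    (hmeq : m = ((x * x) / 10 ^ i * 10 + d) * 10 ^ i + (x * x) % 10 ^ i) (hi : i ≤ pvLen3 (x * x)) :
    m < 10 ^ (pvLen3 (x * x) + 1) := by
  set q := x * x with hq
  set Lq := pvLen3 q with hLq
  have hq1000 : q < 1000 := sq_lt x hx32
  have hqub : q < 10 ^ Lq := pvLen3_ub q hq1000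
  set A := q / 10 ^ i with hA
  set lo := q % 10 ^ i with hlo
  have hipow : (0 : Nat) < 10 ^ i := pow_pos (by norm_num) _
  have hlo_lt : lo < 10 ^ i := Nat.mod_lt _ hipow
  have hAub : A < 10 ^ (Lq - i) := by
    rw [hA, Nat.div_lt_iff_lt_mul hipow]
    calc q < 10 ^ Lq := hqub
    _ = 10 ^ (Lq - i) * 10 ^ i := by rw [← pow_add]; congr 1; omega
  rw [hmeq]
  calc (A * 10 + d) * 10 ^ i + lo < (A * 10 + d) * 10 ^ i + 10 ^ i := Nat.add_lt_add_left hlo_lt _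
  _ = (A * 10 + d + 1) * 10 ^ i := by ring
  _ ≤ (10 ^ (Lq - i) * 10) * 10 ^ i := Nat.mul_le_mul_right _ (by omega)
  _ = 10 ^ (Lq + 1) := by
      rw [mul_right_comm, ← pow_add, (by omega : Lq - i + i = Lq), ← pow_succ]

theorem S4 (m : Nat) (hm : 10 ≤ m) : pvNum m ↔ pvIns m := by
  have hL := td_len m (by omega)
  have hLpos : 1 ≤ (pvTd m).length := List.length_pos_iff.mpr (td_ne_nil m)
  have hL2 : 2 ≤ (pvTd m).length := by
    by_contra hc
    have h1 : (pvTd m).length = 1 := by omega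
    rw [h1] at hL
    simp at hL
    omega
  unfold pvNum pvIns
  set L := (pvTd m).length with hLdef
  obtain ⟨hLlo, hLhi⟩ := hL
  constructor
  · rintro ⟨i, hiL, x, hx32, hveq, hcond⟩
    set q := x * x with hq
    have hq1000 : q < 1000 := sq_lt x hx32
    set H := m / 10 ^ (i + 1) with hH
    set lo := m % 10 ^ i with hlo
    have hipow : (0 : Nat) < 10 ^ i := pow_pos (by norm_num) _
    have hi1pow : (0 : Nat) < 10 ^ (i + 1) := pow_pos (by norm_num) _
    have hlo_lt : lo < 10 ^ i := Nat.mod_lt _ hipow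
    have hqdecomp : q = H * 10 ^ i + lo := hveq.symm
    have hqdiv : q / 10 ^ i = H := by
      rw [hqdecomp, Nat.mul_comm H, Nat.mul_add_div hipow, Nat.div_eq_of_lt hlo_lt]
      omega
    have hqmod : q % 10 ^ i = lo := by
      rw [hqdecomp, Nat.mul_comm H, Nat.mul_add_mod, Nat.mod_eq_of_lt hlo_lt]
    set d := (m / 10 ^ i) % 10 with hd
    have hd9 : d < 10 := Nat.mod_lt _ (by norm_num)
    have e0 : (10 : Nat) ^ (i + 1) = 10 ^ i * 10 := pow_succ 10 i
    have e1 : H = m / 10 ^ i / 10 := by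
      rw [hH, e0, Nat.div_div_eq_div_mul]
    have e2 : m / 10 ^ i = H * 10 + d := by
      rw [e1, hd]
      omega
    have hmdecomp : m = (H * 10 + d) * 10 ^ i + lo := by
      rw [← e2, hlo]
      conv_rhs => rw [Nat.mul_comm]
      exact (Nat.div_add_mod m (10 ^ i)).symm
    have hmain : m = (q / 10 ^ i * 10 + d) * 10 ^ i + q % 10 ^ i := by
      rw [hqdiv, hqmod]
      exact hmdecomp
    by_cases hiL1 : i + 1 = L
    · have hH0 : H = 0 := by
        rw [hH, hiL1]
        exact Nat.div_eq_of_lt hLhi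
      rcases hcond hiL1 with h2 | h2
      · -- L = 2, so i = 1, q < 10
        have hi1 : i = 1 := by omega
        have hq10 : q < 10 := by
          rw [hqdecomp, hH0]
          simp only [Nat.zero_mul, Nat.zero_add]
          calc lo < 10 ^ i := hlo_lt
          _ = 10 := by rw [hi1]; norm_num
        have hlq : pvLen3 q = 1 := by unfold pvLen3; rw [if_pos hq10]
        exact ⟨x, hx32, i, by rw [hlq]; omega, d, hd9, hmain,
          by rw [hlq]; simpa using hm⟩
      · -- 10^(L-2) ≤ q
        have hqlt : q < 10 ^ (L - 1) := by
          rw [hqdecomp, hH0]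
          simp only [Nat.zero_mul, Nat.zero_add]
          calc lo < 10 ^ i := hlo_lt
          _ ≤ 10 ^ (L - 1) := Nat.pow_le_pow_right (by norm_num) (by omega)
        have hlq : pvLen3 q = L - 1 :=
          pvLen3_eq_of q (L - 1) hq1000 (by omega)
            (by rw [(by omega : L - 1 - 1 = L - 2)]; exact h2) hqlt
        refine ⟨x, hx32, i, by rw [hlq]; omega, d, hd9, hmain, ?_⟩
        rw [hlq]
        exact hLlo
    · have hi2 : i + 1 < L := by omega
      have hHlb : 10 ^ (L - 2 - i) ≤ H := by
        rw [hH, Nat.le_div_iff_mul_le hi1pow]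
        calc 10 ^ (L - 2 - i) * 10 ^ (i + 1) = 10 ^ (L - 1) := by
              rw [← pow_add]; congr 1; omega
        _ ≤ m := hLlo
      have hHub : H < 10 ^ (L - 1 - i) := by
        rw [hH, Nat.div_lt_iff_lt_mul hi1pow]
        calc m < 10 ^ L := hLhi
        _ = 10 ^ (L - 1 - i) * 10 ^ (i + 1) := by rw [← pow_add]; congr 1; omega
      have hqlb : 10 ^ (L - 2) ≤ q := by
        rw [hqdecomp]
        calc (10 : Nat) ^ (L - 2) = 10 ^ (L - 2 - i) * 10 ^ i := by
              rw [← pow_add]; congr 1; omega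
        _ ≤ H * 10 ^ i := Nat.mul_le_mul_right _ hHlb
        _ ≤ H * 10 ^ i + lo := Nat.le_add_right _ _
      have hqub2 : q < 10 ^ (L - 1) := by
        rw [hqdecomp]
        calc H * 10 ^ i + lo < H * 10 ^ i + 10 ^ i := Nat.add_lt_add_left hlo_lt _
        _ = (H + 1) * 10 ^ i := by ring
        _ ≤ 10 ^ (L - 1 - i) * 10 ^ i := Nat.mul_le_mul_right _ (by omega)
        _ = 10 ^ (L - 1) := by rw [← pow_add]; congr 1; omega
      have hlq : pvLen3 q = L - 1 :=
        pvLen3_eq_of q (L - 1) hq1000 (by omega)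
          (by rw [(by omega : L - 1 - 1 = L - 2)]; exact hqlb) hqub2
      refine ⟨x, hx32, i, by rw [hlq]; omega, d, hd9, hmain, ?_⟩
      rw [hlq]
      exact hLlo
  · rintro ⟨x, hx32, i, hiLq, d, hd10, hmeq, hg⟩
    set q := x * x with hq
    have hq1000 : q < 1000 := sq_lt x hx32
    set Lq := pvLen3 q with hLq
    have hqub : q < 10 ^ Lq := pvLen3_ub q hq1000
    have hLqpos := pvLen3_pos q
    set A := q / 10 ^ i with hA
    set lo := q % 10 ^ i with hlo
    have hipow : (0 : Nat) < 10 ^ i := pow_pos (by norm_num) _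
    have hlo_lt : lo < 10 ^ i := Nat.mod_lt _ hipow
    have hmub : m < 10 ^ (Lq + 1) := ins_m_ub x i d m hx32 hd10 hmeq hiLq
    have hLeq : L = Lq + 1 := by
      have h1 : Lq < L := by
        rw [← pow10_lt_iff]
        exact lt_of_le_of_lt hg hLhi
      have h2 : L - 1 < Lq + 1 := by
        rw [← pow10_lt_iff]
        exact lt_of_le_of_lt hLlo hmub
      omega
    refine ⟨i, by omega, x, hx32, ?_, ?_⟩
    · have e1 : d * 10 ^ i + lo < 10 ^ (i + 1) := by
        calc d * 10 ^ i + lo < d * 10 ^ i + 10 ^ i := Nat.add_lt_add_left hlo_lt _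
        _ = (d + 1) * 10 ^ i := by ring
        _ ≤ 10 * 10 ^ i := Nat.mul_le_mul_right _ (by omega)
        _ = 10 ^ (i + 1) := by rw [pow_succ]; ring
      have hmdec : m = A * 10 ^ (i + 1) + (d * 10 ^ i + lo) := by
        rw [hmeq, pow_succ]
        ring
      have hdiv : m / 10 ^ (i + 1) = A := by
        rw [hmdec, Nat.mul_comm A, Nat.mul_add_div (pow_pos (by norm_num) _),
          Nat.div_eq_of_lt e1]
        omega
      have hmod : m % 10 ^ i = lo := by
        rw [hmeq, Nat.mul_comm, Nat.mul_add_mod, Nat.mod_eq_of_lt hlo_lt]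
      rw [hdiv, hmod, hA, hlo]
      conv_lhs => rw [Nat.mul_comm]
      exact Nat.div_add_mod q (10 ^ i)
    · intro hcontra
      by_cases hLq1 : Lq = 1
      · left
        omega
      · right
        have h2 : 2 ≤ Lq := by omega
        have hlow := pvLen3_lb q h2
        rw [(by omega : L - 2 = Lq - 1)]
        exact hlow

theorem pvIns_bounds (m : Nat) (h : pvIns m) : 10 ≤ m ∧ m ≤ 9999 := by
  obtain ⟨x, hx32, i, hiLq, d, hd10, hmeq, hg⟩ := h
  have hub := ins_m_ub x i d m hx32 hd10 hmeq hiLq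
  have h1 := pvLen3_pos (x * x)
  have h3 := pvLen3_le3 (x * x)
  constructor
  · calc (10 : Nat) = 10 ^ 1 := by norm_num
    _ ≤ 10 ^ pvLen3 (x * x) := Nat.pow_le_pow_right (by norm_num) h1
    _ ≤ m := hg
  · have : m < 10 ^ 4 := lt_of_lt_of_le hub (Nat.pow_le_pow_right (by norm_num) (by omega))
    norm_num at this
    omega

-- step S2: the B port's candidate set, characterized ------------------------------

theorem mem_foldl_gen {β : Type} (step : PySem.Set Int → β → PySem.Set Int)
    (Q : β → Int → Prop)
    (hstep : ∀ cs b y, y ∈ step cs b ↔ y ∈ cs ∨ Q b y) :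
    ∀ (l : List β) (cs : PySem.Set Int) (y : Int),
      y ∈ l.foldl step cs ↔ y ∈ cs ∨ ∃ b ∈ l, Q b y := by
  intro l
  induction l with
  | nil => intro cs y; simp
  | cons b l ih =>
    intro cs y
    simp only [List.foldl_cons]
    rw [ih, hstep]
    constructor
    · rintro (h | h)
      · rcases h with h | h
        · exact Or.inl h
        · exact Or.inr ⟨b, by simp, h⟩
      · rcases h with ⟨b', hb', hq⟩
        exact Or.inr ⟨b', by simp [hb'], hq⟩
    · rintro (h | ⟨b', hb', hq⟩)
      · exact Or.inl (Or.inl h)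
      · rcases List.mem_cons.mp hb' with rfl | hb'
        · exact Or.inl (Or.inr hq)
        · exact Or.inr ⟨b', hb', hq⟩

-- Int-level loop mirror of altCands membership
def pvL (x : Int) : Int := if x * x < 10 then 1 else if x * x < 100 then 2 else 3

def pvT (x i d : Int) : Int :=
  (PySem.Int.floordiv (x * x) ((10 : Int) ^ i.toNat) * 10 + d) * (10 : Int) ^ i.toNat +
    PySem.Int.mod (x * x) ((10 : Int) ^ i.toNat)

theorem S2a (y : Int) : y ∈ altCands ↔ ∃ x : Int, (0 ≤ x ∧ x < 32) ∧ ∃ i : Int,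
    (0 ≤ i ∧ i < pvL x + 1) ∧ ∃ d : Int, (0 ≤ d ∧ d < 10) ∧
    (10 : Int) ^ (pvL x).toNat ≤ pvT x i d ∧ y = pvT x i d := by
  unfold altCands
  rw [mem_foldl_gen _ (fun x y => ∃ i : Int,
      (0 ≤ i ∧ i < pvL x + 1) ∧ ∃ d : Int, (0 ≤ d ∧ d < 10) ∧
      (10 : Int) ^ (pvL x).toNat ≤ pvT x i d ∧ y = pvT x i d) ?hx]
  · constructor
    · rintro (h | ⟨x, hx, h⟩)
      · simp [PySem.Set.empty] at h
      · exact ⟨x, by rwa [PySem.List.mem_pyRange_one] at hx, h⟩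
    · rintro ⟨x, hx, h⟩
      exact Or.inr ⟨x, by rw [PySem.List.mem_pyRange_one]; exact hx, h⟩
  · intro cs x y'
    rw [mem_foldl_gen _ (fun i y => ∃ d : Int, (0 ≤ d ∧ d < 10) ∧
        (10 : Int) ^ (pvL x).toNat ≤ pvT x i d ∧ y = pvT x i d) ?hi]
    · constructor
      · rintro (h | ⟨i, hi, h⟩)
        · exact Or.inl h
        · rw [PySem.List.mem_pyRange_one] at hi
          exact Or.inr ⟨i, hi, h⟩
      · rintro (h | ⟨i, hi, h⟩)
        · exact Or.inl h
        · exact Or.inr ⟨i, by rw [PySem.List.mem_pyRange_one]; exact hi, h⟩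
    · intro cs' i y''
      rw [mem_foldl_gen _ (fun d y => (10 : Int) ^ (pvL x).toNat ≤ pvT x i d ∧ y = pvT x i d) ?hd]
      · constructor
        · rintro (h | ⟨d, hd, h⟩)
          · exact Or.inl h
          · rw [PySem.List.mem_pyRange_one] at hd
            exact Or.inr ⟨d, hd, h⟩
        · rintro (h | ⟨d, hd, h⟩)
          · exact Or.inl h
          · exact Or.inr ⟨d, by rw [PySem.List.mem_pyRange_one]; exact hd, h⟩
      · intro cs'' d y'''
        dsimp only
        show y''' ∈ (if (10 : Int) ^ (pvL x).toNat ≤ pvT x i d then PySem.Set.add cs'' (pvT x i d) else cs'') ↔ _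
        split_ifs with hg
        · rw [PySem.Set.mem_add]
          tauto
        · tauto

theorem lenInt_eq (u : Nat) : pvL (u : Int) = (pvLen3 (u * u) : Int) := by
  unfold pvL pvLen3
  have hc : ((u : Int) * (u : Int)) = ((u * u : Nat) : Int) := by push_cast; ring
  rw [hc]
  split_ifs with h1 h2 h3 h4 h5 <;> first | rfl | (exfalso; omega)

theorem pvT_cast (u v d : Nat) :
    pvT (u : Int) (v : Int) (d : Int) =
      (((u * u) / 10 ^ v * 10 + d) * 10 ^ v + (u * u) % 10 ^ v : Nat) := by
  unfold pvT
  have h1 : ((v : Int)).toNat = v := by omega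
  rw [h1]
  have h2 : ((10 : Int) ^ v) = ((10 ^ v : Nat) : Int) := by push_cast; ring
  have h3 : ((u : Int) * u) = ((u * u : Nat) : Int) := by push_cast; ring
  rw [h2, h3, PySem.Int.floordiv_natCast, PySem.Int.mod_natCast]
  push_cast
  ring

theorem S2 (y : Int) : y ∈ altCands ↔ ∃ k : Nat, y = (k : Int) ∧ pvIns k := by
  rw [S2a]
  constructor
  · rintro ⟨x, ⟨hx0, hx32⟩, i, ⟨hi0, hiU⟩, d, ⟨hd0, hd10⟩, hg, rfl⟩
    obtain ⟨u, rfl⟩ := Int.eq_ofNat_of_zero_le hx0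
    obtain ⟨v, rfl⟩ := Int.eq_ofNat_of_zero_le hi0
    obtain ⟨w, rfl⟩ := Int.eq_ofNat_of_zero_le hd0
    refine ⟨((u * u) / 10 ^ v * 10 + w) * 10 ^ v + (u * u) % 10 ^ v, ?_, ?_⟩
    · rw [pvT_cast]
    · refine ⟨u, by exact_mod_cast hx32, v, ?_, w, by exact_mod_cast hd10, rfl, ?_⟩
      · rw [lenInt_eq] at hiU
        exact_mod_cast (by omega : (v : Int) ≤ (pvLen3 (u * u) : Int))
      · rw [lenInt_eq] at hg
        have h1 : ((pvLen3 (u * u) : Int)).toNat = pvLen3 (u * u) := by omega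
        rw [h1, pvT_cast] at hg
        exact_mod_cast hg
  · rintro ⟨k, rfl, u, hu, v, hv, w, hw, hk, hg⟩
    refine ⟨(u : Int), ⟨by positivity, by exact_mod_cast hu⟩, (v : Int),
      ⟨by positivity, ?_⟩, (w : Int), ⟨by positivity, by exact_mod_cast hw⟩, ?_, ?_⟩
    · rw [lenInt_eq]
      exact_mod_cast (by omega : (v : Int) < (pvLen3 (u * u) : Int) + 1)
    · rw [lenInt_eq, pvT_cast]
      have h1 : ((pvLen3 (u * u) : Int)).toNat = pvLen3 (u * u) := by omega
      rw [h1]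
      rw [hk] at hg
      exact_mod_cast hg
    · rw [pvT_cast]
      exact_mod_cast hk

theorem nodup_foldl_preserve {β : Type} (f : PySem.Set Int → β → PySem.Set Int)
    (hf : ∀ cs b, cs.Nodup → (f cs b).Nodup) :
    ∀ (l : List β) (cs : PySem.Set Int), cs.Nodup → (l.foldl f cs).Nodup := by
  intro l
  induction l with
  | nil => intro cs h; exact h
  | cons b l ih => intro cs h; exact ih _ (hf cs b h)

theorem nodup_altCands : altCands.Nodup := by
  unfold altCands
  apply nodup_foldl_preserve _ ?ha _ _ List.nodup_nil
  intro cs x hnd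
  apply nodup_foldl_preserve _ ?hb _ _ hnd
  intro cs' i hnd2
  apply nodup_foldl_preserve _ ?hc _ _ hnd2
  intro cs'' d hnd3
  dsimp only
  split_ifs <;> first | exact hnd3 | (apply PySem.Set.nodup_add <;> assumption)

-- the key pointwise fact ----------------------------------------------------------

theorem key (n : Int) (hn : 10 ≤ n) : almostSquare n = decide (n ∈ altCands) := by
  have hiff : almostSquare n = true ↔ n ∈ altCands := by
    rw [S1 n hn, S3 _ (by omega), S4 _ (by omega), S2]
    constructor
    · intro h
      exact ⟨n.toNat, by omega, h⟩
    · rintro ⟨k, hk, h⟩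
      have he : n.toNat = k := by omega
      rwa [he]
  by_cases hmem : n ∈ altCands
  · simp [hmem, hiff.mpr hmem]
  · have hf : almostSquare n = false := by
      rcases Bool.eq_false_or_eq_true (almostSquare n) with h | h
      · exact absurd (hiff.mp h) hmem
      · exact h
    simp [hmem, hf]

theorem altCands_bounds : ∀ y ∈ altCands, (10 : Int) ≤ y ∧ y ≤ 9999 := by
  intro y hy
  obtain ⟨k, rfl, hins⟩ := (S2 y).mp hy
  have h := pvIns_bounds k hins
  omega

-- counting machinery --------------------------------------------------------------

theorem foldl_count (p : Int → Bool) : ∀ (l : List Int) (c : Int),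
    l.foldl (fun c n => if p n then c + 1 else c) c = c + (l.countP p : Int) := by
  intro l
  induction l with
  | nil => intro c; simp
  | cons x l ih =>
    intro c
    simp only [List.foldl_cons, List.countP_cons]
    rw [ih]
    by_cases h : p x
    · simp only [h, if_true]
      push_cast
      omega
    · simp only [h, if_false]
      push_cast
      omega

theorem sum_ones (p : Int → Bool) : ∀ l : List Int,
    ((l.filter p).map (fun _ => (1 : Int))).sum = (l.countP p : Int) := by
  intro l
  induction l with
  | nil => simp
  | cons x l ih =>
    by_cases h : p x
    · simp only [List.filter_cons, List.countP_cons, h, if_true, List.map_cons,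
        List.sum_cons, ih]
      push_cast
      omega
    · simp [List.filter_cons, List.countP_cons, h, ih, ← List.countP_eq_length_filter]

theorem solB (a : Int) : solution_alt a = (altCands.countP (fun m => decide (m ≤ a)) : Int) := by
  unfold solution_alt
  exact sum_ones _ altCands

theorem count_step (a : Int) : ∀ l : List Int, l.Nodup →
    l.countP (fun m => decide (m ≤ a + 1)) =
      l.countP (fun m => decide (m ≤ a)) + (if (a + 1) ∈ l then 1 else 0) := by
  intro l
  induction l with
  | nil => intro _; simp
  | cons x l ih =>
    intro hnd
    rw [List.nodup_cons] at hnd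
    obtain ⟨hx, hnd⟩ := hnd
    rw [List.countP_cons, List.countP_cons, ih hnd]
    by_cases he : x = a + 1
    · subst he
      rw [if_pos (List.mem_cons_self), if_neg hx]
      simp
    · have hmc : ((a + 1) ∈ x :: l) ↔ ((a + 1) ∈ l) := by
        rw [List.mem_cons]
        constructor
        · rintro (h | h)
          · exact absurd h.symm he
          · exact h
        · exact Or.inr
      rw [if_congr hmc rfl rfl]
      have hdx : (decide (x ≤ a + 1)) = (decide (x ≤ a)) := by
        have : (x ≤ a + 1) ↔ (x ≤ a) := by omega
        simp [this]
      rw [hdx]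
      omega

theorem mainEq : ∀ a : Int, (PySem.List.pyRange 10 (a + 1) 1).countP almostSquare =
    altCands.countP (fun m => decide (m ≤ a)) := by
  have hbase : ∀ a : Int, a ≤ 9 → (PySem.List.pyRange 10 (a + 1) 1).countP almostSquare =
      altCands.countP (fun m => decide (m ≤ a)) := by
    intro a ha
    rw [PySem.List.pyRange_one_eq_nil (by omega)]
    simp only [List.countP_nil]
    symm
    rw [List.countP_eq_zero]
    intro m hm
    have hb := altCands_bounds m hm
    simp only [decide_eq_true_eq]
    omega
  have hstep : ∀ a : Int, 9 ≤ a → (PySem.List.pyRange 10 (a + 1) 1).countP almostSquare =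
      altCands.countP (fun m => decide (m ≤ a)) := by
    intro a h9
    induction a, h9 using Int.le_induction with
    | base => exact hbase 9 (by omega)
    | succ n hn ih =>
      rw [PySem.List.pyRange_one_succ_right (by omega : (10 : Int) ≤ n + 1), List.countP_append, ih,
        count_step n altCands nodup_altCands]
      have hk := key (n + 1) (by omega)
      by_cases hmem : (n + 1) ∈ altCands
      · simp [hmem, hk, List.countP_cons]
      · simp [hmem, hk, List.countP_cons]
  intro a
  by_cases ha : a ≤ 9
  · exact hbase a ha
  · exact hstep a (by omega)

-- ===== VERDICT (by name: the statement is the Claim_ definition above) =====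
theorem solution_spec : Claim_equal_solution := by
  intro a _
  unfold Spec_solution
  rw [solution, foldl_count, solB, mainEq]
  omega
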